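-- pv_equiv track=rewrite | github.com/larahoffman/algo1 | Python/parcial2023.py | columnas_repetidas
-- ===== SOURCE A (Python) =====
-- def columnas_repetidas(matriz:list[list[int]]) -> bool:
--     lista_primera_mitad:list[int] = []
--     lista_segunda_mitad:list[int] = []
--     numero_filas:int = len(matriz)
--     numero_columnas:int = len(matriz[0])
--
--     for fila in range(numero_filas):
--         for columna in range(numero_columnas // 2):
--             lista_primera_mitad.append(matriz[fila][columna])
--         for columna in range(numero_columnas // 2, numero_columnas):
--             lista_segunda_mitad.append(matriz[fila][columna])
--     return lista_primera_mitad == lista_segunda_mitad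
-- ===== SOURCE B (Python) =====
-- def columnas_repetidas(matriz: list[list[int]]) -> bool:
--     numero_columnas = len(matriz[0])
--     if numero_columnas % 2 != 0:
--         return False
--     mitad = numero_columnas // 2
--     return all(fila[mitad:numero_columnas] == fila[:mitad] for fila in matriz)
-- ===== Notes on version B (the rewrite author's own statement) =====
-- stated objective: simpler
-- what changed: Instead of flattening the whole matrix into two index-built lists and comparing them at the end, B rejects odd column counts up front and compares the two slice halves of each row directly with all(), short-circuiting on the first mismatching row.
import Mathlib
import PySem

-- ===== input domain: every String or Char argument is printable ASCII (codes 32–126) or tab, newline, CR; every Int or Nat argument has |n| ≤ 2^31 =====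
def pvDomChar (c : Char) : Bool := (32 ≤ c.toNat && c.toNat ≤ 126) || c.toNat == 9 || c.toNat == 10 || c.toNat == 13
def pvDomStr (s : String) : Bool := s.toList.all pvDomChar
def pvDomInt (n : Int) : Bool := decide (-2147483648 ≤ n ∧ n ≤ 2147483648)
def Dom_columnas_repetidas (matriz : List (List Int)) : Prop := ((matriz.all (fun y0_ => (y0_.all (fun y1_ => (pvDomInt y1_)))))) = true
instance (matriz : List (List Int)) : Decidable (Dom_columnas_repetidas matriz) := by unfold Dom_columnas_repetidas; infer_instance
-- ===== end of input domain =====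

-- B is simpler: it rejects an odd column count up front and compares the two slice halves of
-- each row directly (short-circuiting), instead of flattening the matrix into two index-built lists.

-- ===== PORT A =====
def columnas_repetidas (matriz : List (List Int)) : Bool :=
  let numero_filas : Int := (matriz.length : Int)
  let numero_columnas : Int := ((PySem.List.pyGetD matriz 0 []).length : Int)
  let p :=
    (PySem.List.pyRange 0 numero_filas 1).foldl
      (fun (st : List Int × List Int) fila =>
        let fl := PySem.List.pyGetD matriz fila []
        ((PySem.List.pyRange 0 (PySem.Int.floordiv numero_columnas 2) 1).foldl
           (fun l1 columna => l1 ++ [PySem.List.pyGetD fl columna 0]) st.1,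
         (PySem.List.pyRange (PySem.Int.floordiv numero_columnas 2) numero_columnas 1).foldl
           (fun l2 columna => l2 ++ [PySem.List.pyGetD fl columna 0]) st.2))
      ([], [])
  p.1 == p.2

-- ===== PORT B =====
def columnas_repetidas_alt (matriz : List (List Int)) : Bool :=
  let numero_columnas : Int := ((PySem.List.pyGetD matriz 0 []).length : Int)
  if PySem.Int.mod numero_columnas 2 != 0 then false
  else
    let mitad : Int := PySem.Int.floordiv numero_columnas 2
    matriz.all (fun fila =>
      PySem.List.slice fila (some mitad) (some numero_columnas)
        == PySem.List.slice fila none (some mitad))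

-- ===== PRECONDITION & SPEC =====
-- Pre_ excludes exactly the inputs on which A raises IndexError: the empty matrix
-- (matriz[0]) and matrices with a row shorter than the first row.
def Pre_columnas_repetidas (matriz : List (List Int)) : Prop :=
  matriz ≠ [] ∧ ∀ fila ∈ matriz, (PySem.List.pyGetD matriz 0 ([] : List Int)).length ≤ fila.length
instance (matriz : List (List Int)) : Decidable (Pre_columnas_repetidas matriz) := by
  unfold Pre_columnas_repetidas; infer_instance

def pvWitness_columnas_repetidas : List (List Int) := [[1, 2], [1, 2]]

def Spec_columnas_repetidas (matriz : List (List Int)) (out : Bool) : Prop := out = columnas_repetidas_alt matriz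
instance (matriz : List (List Int)) (out : Bool) : Decidable (Spec_columnas_repetidas matriz out) := by
  unfold Spec_columnas_repetidas; infer_instance

-- ===== CLAIM (what is proved, stated in full; the proofs are below) =====
def Claim_equal_columnas_repetidas : Prop := ∀ (matriz : List (List Int)), Dom_columnas_repetidas matriz → Pre_columnas_repetidas matriz → Spec_columnas_repetidas matriz (columnas_repetidas matriz)

-- ===== LEMMAS AND PROOFS =====

-- A's inner append loop over range(a,b) collects fl[a:b] (as take/drop) when b ≤ len(fl)
theorem pv_inner (fl : List Int) (a b : Int) (h0 : 0 ≤ a) (hb : b ≤ (fl.length : Int))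
    (acc : List Int) :
    (PySem.List.pyRange a b 1).foldl
      (fun l c => l ++ [PySem.List.pyGetD fl c 0]) acc
    = acc ++ (fl.take b.toNat).drop a.toNat := by
  rw [PySem.List.foldl_append_singleton_eq_map, PySem.List.pyRange_one]
  congr 1
  by_cases h : b ≤ a
  · have h1 : (b - a).toNat = 0 := by omega
    have h2 : (fl.take b.toNat).drop a.toNat = [] := by
      apply List.drop_eq_nil_of_le; simp; omega
    simp [h1, h2]
  · push Not at h
    apply List.ext_getElem
    · simp; omega
    · intro i h1 h2
      simp only [List.getElem_map, List.getElem_range]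
      have hlt : a.toNat + i < b.toNat := by simp at h2; omega
      have hc : a + (i : Int) = ((a.toNat + i : Nat) : Int) := by omega
      rw [hc, PySem.List.pyGetD_natCast]
      rw [List.getElem_drop, List.getElem_take]
      rw [List.getD_eq_getElem _ _ (by omega)]

-- A's outer loop (after range→foldl conversion) builds the two flattened half-column lists
theorem pv_outer (l : List (List Int)) (nc : Nat) (hnc : ∀ fl ∈ l, nc ≤ fl.length) (a b : List Int) :
    l.foldl (fun (st : List Int × List Int) fl =>
        ((PySem.List.pyRange 0 ((nc / 2 : Nat) : Int) 1).foldl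
           (fun l1 c => l1 ++ [PySem.List.pyGetD fl c 0]) st.1,
         (PySem.List.pyRange ((nc / 2 : Nat) : Int) ((nc : Nat) : Int) 1).foldl
           (fun l2 c => l2 ++ [PySem.List.pyGetD fl c 0]) st.2)) (a, b)
    = (a ++ l.flatMap (fun fl => fl.take (nc / 2)),
       b ++ l.flatMap (fun fl => (fl.take nc).drop (nc / 2))) := by
  induction l generalizing a b with
  | nil => simp
  | cons x t ih =>
    have hx : nc ≤ x.length := hnc x (by simp)
    rw [List.foldl_cons,
      pv_inner x 0 ((nc / 2 : Nat) : Int) (by norm_num) (by simp; omega),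
      pv_inner x ((nc / 2 : Nat) : Int) ((nc : Nat) : Int) (by positivity) (by simp; omega)]
    rw [ih (fun y hy => hnc y (by simp [hy]))]
    simp [List.flatMap_cons]
    constructor <;> omega

theorem pv_sum_const {α : Type} (l : List α) (f : α → Nat) (c : Nat) (h : ∀ x ∈ l, f x = c) :
    (l.map f).sum = l.length * c := by
  induction l with
  | nil => simp
  | cons x t ih =>
    rw [List.map_cons, List.sum_cons, h x (by simp), ih (fun y hy => h y (by simp [hy])),
      List.length_cons]
    ring

-- concatenations of rowwise blocks of equal length agree iff they agree row by row
theorem pv_flatMap_eq (l : List (List Int)) (f g : List Int → List Int)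
    (h : ∀ x ∈ l, (f x).length = (g x).length) :
    l.flatMap f = l.flatMap g ↔ ∀ x ∈ l, f x = g x := by
  induction l with
  | nil => simp
  | cons x t ih =>
    simp only [List.flatMap_cons, List.forall_mem_cons]
    constructor
    · intro he
      have h2 := List.append_inj he (h x (by simp))
      exact ⟨h2.1, (ih (fun y hy => h y (List.mem_cons_of_mem _ hy))).mp h2.2⟩
    · rintro ⟨h1, h2⟩
      rw [h1, (ih (fun y hy => h y (List.mem_cons_of_mem _ hy))).mpr h2]

-- the flattened comparison succeeds iff the column count is even and every row's halves agree
theorem pv_main (l : List (List Int)) (nc : Nat) (hne : l ≠ [])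
    (hl : ∀ fl ∈ l, nc ≤ fl.length) :
    (l.flatMap (fun fl => fl.take (nc / 2)) = l.flatMap (fun fl => (fl.take nc).drop (nc / 2)))
    ↔ (nc % 2 = 0 ∧ ∀ fl ∈ l, (fl.take nc).drop (nc / 2) = fl.take (nc / 2)) := by
  have hlen1 : ∀ fl ∈ l, (fl.take (nc / 2)).length = nc / 2 := by
    intro fl h; have := hl fl h; simp; omega
  have hlen2 : ∀ fl ∈ l, ((fl.take nc).drop (nc / 2)).length = nc - nc / 2 := by
    intro fl h; have := hl fl h; simp; omega
  have hpos : 1 ≤ l.length := by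
    cases l with | nil => exact absurd rfl hne | cons x t => simp
  constructor
  · intro he
    have hlen := congrArg List.length he
    rw [List.length_flatMap, List.length_flatMap,
      pv_sum_const l _ _ hlen1, pv_sum_const l _ _ hlen2] at hlen
    have hev : nc % 2 = 0 := by
      have := Nat.eq_of_mul_eq_mul_left (by omega : 0 < l.length) hlen
      omega
    refine ⟨hev, fun fl hfl => ?_⟩
    exact ((pv_flatMap_eq l _ _ (fun x hx => by rw [hlen1 x hx, hlen2 x hx]; omega)).mp he fl hfl).symm
  · rintro ⟨hev, hcols⟩
    exact (pv_flatMap_eq l _ _ (fun x hx => by rw [hlen1 x hx, hlen2 x hx]; omega)).mpr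
      (fun x hx => (hcols x hx).symm)

theorem pv_A_eq (r0 : List Int) (rest : List (List Int))
    (hrows : ∀ fila ∈ r0 :: rest, r0.length ≤ fila.length) :
    columnas_repetidas (r0 :: rest)
    = decide ((r0 :: rest).flatMap (fun fl => fl.take (r0.length / 2))
        = (r0 :: rest).flatMap (fun fl => (fl.take r0.length).drop (r0.length / 2))) := by
  unfold columnas_repetidas
  simp only [PySem.List.pyGetD_zero_cons]
  rw [show (2 : Int) = ((2 : Nat) : Int) from rfl]
  simp only [PySem.Int.floordiv_natCast]
  rw [PySem.List.foldl_pyRange_zero_pyGetD' (r0 :: rest) []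
    (fun (st : List Int × List Int) fl =>
      ((PySem.List.pyRange 0 ((r0.length / 2 : Nat) : Int) 1).foldl
         (fun l1 columna => l1 ++ [PySem.List.pyGetD fl columna 0]) st.1,
       (PySem.List.pyRange ((r0.length / 2 : Nat) : Int) ((r0.length : Nat) : Int) 1).foldl
         (fun l2 columna => l2 ++ [PySem.List.pyGetD fl columna 0]) st.2))
    ([], [])]
  rw [pv_outer (r0 :: rest) r0.length hrows [] []]
  apply Bool.coe_iff_coe.mp
  simp

theorem pv_B_eq (r0 : List Int) (rest : List (List Int)) :
    columnas_repetidas_alt (r0 :: rest)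
    = if r0.length % 2 = 0 then
        decide (∀ fl ∈ r0 :: rest, (fl.take r0.length).drop (r0.length / 2) = fl.take (r0.length / 2))
      else false := by
  unfold columnas_repetidas_alt
  simp only [PySem.List.pyGetD_zero_cons]
  rw [show (2 : Int) = ((2 : Nat) : Int) from rfl]
  simp only [PySem.Int.mod_natCast, PySem.Int.floordiv_natCast]
  by_cases hev : r0.length % 2 = 0
  · simp only [hev, if_pos, Nat.cast_zero, bne_self_eq_false, Bool.false_eq_true, if_false]
    simp only [PySem.List.slice_natCast, PySem.List.slice_to_natCast]
    apply Bool.coe_iff_coe.mp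
    simp [List.all_eq_true, List.drop_take]
  · have hb : ((((r0.length % 2 : Nat) : Int)) != 0) = true := by
      simp; omega
    rw [hb, if_pos rfl, if_neg hev]

-- ===== VERDICT (by name: the statement is the Claim_ definition above) =====
theorem columnas_repetidas_spec : Claim_equal_columnas_repetidas := by
  intro matriz _ hpre
  unfold Spec_columnas_repetidas
  obtain ⟨hne, hrows⟩ := hpre
  cases matriz with
  | nil => exact absurd rfl hne
  | cons r0 rest =>
    simp only [PySem.List.pyGetD_zero_cons] at hrows
    rw [pv_A_eq r0 rest hrows, pv_B_eq r0 rest]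
    by_cases hev : r0.length % 2 = 0
    · rw [if_pos hev, decide_eq_decide,
        pv_main (r0 :: rest) r0.length (by simp) hrows]
      simp [hev]
    · rw [if_neg hev, decide_eq_false_iff_not]
      intro h
      exact hev ((pv_main (r0 :: rest) r0.length (by simp) hrows).mp h).1
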